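-- pv_equiv track=rewrite | github.com/OpenHands/software-agent-sdk | openhands-agent-server/openhands/agent_server/docker/clear_execstack.py | _is_shared_object
-- ===== SOURCE A (Python) =====
-- def _is_shared_object(name: str) -> bool:
--     """Return True if ``name`` looks like a shared-object filename.
--
--     Matches ``foo.so``, ``foo.so.1``, ``foo.so.1.0``, etc. Deliberately ignores
--     ``.py``, ``.pyc``, and other non-ELF files so the caller can pass any
--     directory and have the helper pick only relevant payloads.
--     """
--     if ".so" not in name:
--         return False
--     # Must contain a ".so" path component followed by either end-of-string or
--     # a version suffix ("libfoo.so", "libfoo.so.1.2.3"). Reject things like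
--     # "foo.sources" that happen to contain ".so".
--     parts = name.split(".")
--     for i, part in enumerate(parts):
--         if part == "so":
--             remainder = parts[i + 1 :]
--             if not remainder or all(p.isdigit() for p in remainder):
--                 return True
--     return False
-- ===== SOURCE B (Python) =====
-- def _is_shared_object(name: str) -> bool:
--     """Peel the numeric version suffix off the dot-components, then check the
--     name ends in a ".so" component (at least one component before "so")."""
--     parts = name.split(".")
--     while len(parts) > 1 and parts[-1].isdigit():
--         parts.pop()
--     return len(parts) >= 2 and parts[-1] == "so"
-- ===== Notes on version B (the rewrite author's own statement) =====
-- stated objective: simpler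
-- what changed: A scans forward for a 'so' component and validates its whole remainder (plus a substring pre-check); B instead peels the trailing all-digit version components off the split list and then just checks the last remaining component is 'so' with at least one component before it.
import Mathlib
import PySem

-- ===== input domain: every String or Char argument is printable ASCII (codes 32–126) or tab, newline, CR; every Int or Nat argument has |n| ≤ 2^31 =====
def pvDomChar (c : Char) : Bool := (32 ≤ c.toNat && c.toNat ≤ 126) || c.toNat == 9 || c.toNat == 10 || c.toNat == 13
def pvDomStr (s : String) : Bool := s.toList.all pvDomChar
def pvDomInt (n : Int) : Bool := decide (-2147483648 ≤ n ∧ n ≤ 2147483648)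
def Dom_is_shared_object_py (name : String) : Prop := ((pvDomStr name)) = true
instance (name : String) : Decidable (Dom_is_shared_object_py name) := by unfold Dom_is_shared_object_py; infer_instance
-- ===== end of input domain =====

-- B peels the trailing all-digit version components off name.split(".") and then checks the
-- last remaining component is "so" with at least one component before it, instead of A's
-- forward scan for a "so" component whose whole remainder is digits (plus A's ".so"
-- substring pre-check).  Return-value equivalence on all inputs; neither mutates anything.

-- ===== PORT A =====
-- name.split(".") is ported at the char level as PySem.Chars.splitOn name.toList ['.']
-- (the separator is the nonempty literal ".", so Python's split never raises; string
-- components are List Char, "so" = ['s','o']).  The for-loop over enumerate(parts) with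
-- remainder = parts[i+1:] becomes structural recursion carrying the remainder; Python's
-- 'not remainder or all(p.isdigit() for p in remainder)' is rest.isEmpty || rest.all strIsdigit.

def isSharedLoopA : List (List Char) → Bool
  | [] => false
  | p :: rest =>
      if p = ['s', 'o'] && (rest.isEmpty || rest.all PySem.Chars.strIsdigit) then true
      else isSharedLoopA rest

def is_shared_object_py (name : String) : Bool :=
  if !(PySem.Str.isIn ".so" name) then false
  else isSharedLoopA (PySem.Chars.splitOn name.toList ['.'])

-- ===== PORT B =====
-- the while-loop 'while len(parts) > 1 and parts[-1].isdigit(): parts.pop()';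
-- parts[-1], read only under the guard len(parts) > 1, is getLastD [].
def peelVersion (parts : List (List Char)) : List (List Char) :=
  if 1 < parts.length ∧ PySem.Chars.strIsdigit (parts.getLastD []) then
    peelVersion parts.dropLast
  else parts
termination_by parts.length
decreasing_by simp [List.length_dropLast]; omega

def is_shared_object_py_alt (name : String) : Bool :=
  let parts := peelVersion (PySem.Chars.splitOn name.toList ['.'])
  decide (2 ≤ parts.length) && (parts.getLastD [] == ['s', 'o'])

-- ===== PRECONDITION & SPEC =====
-- A is total (split(".") never raises), so no Pre_ is needed.
def Spec_is_shared_object_py (name : String) (out : Bool) : Prop := out = is_shared_object_py_alt name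
instance (name : String) (out : Bool) : Decidable (Spec_is_shared_object_py name out) := by unfold Spec_is_shared_object_py; infer_instance

-- ===== CLAIM (what is proved, stated in full; the proofs are below) =====
def Claim_equal_is_shared_object_py : Prop := ∀ (name : String), Dom_is_shared_object_py name → Spec_is_shared_object_py name (is_shared_object_py name)

-- ===== LEMMAS AND PROOFS =====

def spDot : List Char → List (List Char)
  | [] => [[]]
  | c :: rest =>
      if c = '.' then [] :: spDot rest
      else
        match spDot rest with
        | [] => [[c]]
        | p :: ps => (c :: p) :: ps

lemma spDot_ne_nil (cs : List Char) : spDot cs ≠ [] := by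
  induction cs with
  | nil => simp [spDot]
  | cons c rest ih =>
    simp only [spDot]
    split
    · simp
    · cases h : spDot rest <;> simp

lemma splitOn_go_eq (cs : List Char) : ∀ (fuel : Nat) (cur : List Char) (acc : List (List Char)),
    cs.length < fuel →
    PySem.Chars.splitOn.go ['.'] fuel cs cur acc =
      acc.reverse ++ (cur.reverse ++ (spDot cs).headI) :: (spDot cs).tail := by
  induction cs with
  | nil =>
    intro fuel cur acc hf
    cases fuel with
    | zero => omega
    | succ f => simp [PySem.Chars.splitOn.go, spDot]
  | cons c rest ih =>
    intro fuel cur acc hf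
    cases fuel with
    | zero => simp at hf
    | succ f =>
      simp only [PySem.Chars.splitOn.go]
      by_cases hc : c = '.'
      · subst hc
        rw [if_pos (by simp [List.isPrefixOf])]
        simp only [List.length_cons, List.length_nil, List.drop_succ_cons, List.drop_zero]
        rw [ih f [] (cur.reverse :: acc) (by simp at hf ⊢; omega)]
        obtain ⟨p, ps, hps⟩ : ∃ p ps, spDot rest = p :: ps := by
          cases h : spDot rest with
          | nil => exact absurd h (spDot_ne_nil rest)
          | cons p ps => exact ⟨p, ps, rfl⟩
        simp [spDot, hps]
      · rw [if_neg (by simp [List.isPrefixOf]; intro h; exact hc h.symm)]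
        rw [ih f (c :: cur) acc (by simp at hf ⊢; omega)]
        obtain ⟨p, ps, hps⟩ : ∃ p ps, spDot rest = p :: ps := by
          cases h : spDot rest with
          | nil => exact absurd h (spDot_ne_nil rest)
          | cons p ps => exact ⟨p, ps, rfl⟩
        simp [spDot, hps, if_neg hc]

lemma splitOn_eq_spDot (cs : List Char) : PySem.Chars.splitOn cs ['.'] = spDot cs := by
  rw [PySem.Chars.splitOn, splitOn_go_eq cs (cs.length + 1) [] [] (by omega)]
  obtain ⟨p, ps, hps⟩ : ∃ p ps, spDot cs = p :: ps := by
    cases h : spDot cs with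
    | nil => exact absurd h (spDot_ne_nil cs)
    | cons p ps => exact ⟨p, ps, rfl⟩
  simp [hps]

def joinDot : List (List Char) → List Char
  | [] => []
  | [p] => p
  | p :: ps => p ++ '.' :: joinDot ps

lemma joinDot_cons (p : List Char) (q : List Char) (ps : List (List Char)) :
    joinDot (p :: q :: ps) = p ++ '.' :: joinDot (q :: ps) := rfl

lemma joinDot_spDot (cs : List Char) : joinDot (spDot cs) = cs := by
  induction cs with
  | nil => simp [spDot, joinDot]
  | cons c rest ih =>
    simp only [spDot]
    by_cases hc : c = '.'
    · subst hc
      rw [if_pos rfl]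
      obtain ⟨p, ps, hps⟩ : ∃ p ps, spDot rest = p :: ps := by
        cases h : spDot rest with
        | nil => exact absurd h (spDot_ne_nil rest)
        | cons p ps => exact ⟨p, ps, rfl⟩
      rw [hps, joinDot_cons]
      rw [hps] at ih
      simp [ih]
    · rw [if_neg hc]
      obtain ⟨p, ps, hps⟩ : ∃ p ps, spDot rest = p :: ps := by
        cases h : spDot rest with
        | nil => exact absurd h (spDot_ne_nil rest)
        | cons p ps => exact ⟨p, ps, rfl⟩
      rw [hps] at ih ⊢
      cases ps with
      | nil => simpa [joinDot] using ih
      | cons q qs => rw [joinDot_cons] at ih ⊢; simpa using ih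

def HasSo (ps : List (List Char)) : Prop :=
  ∃ pre suf, ps = pre ++ ['s', 'o'] :: suf ∧ ∀ p ∈ suf, PySem.Chars.strIsdigit p

def HasSoStrict (ps : List (List Char)) : Prop :=
  ∃ pre suf, ps = pre ++ ['s', 'o'] :: suf ∧ pre ≠ [] ∧ ∀ p ∈ suf, PySem.Chars.strIsdigit p

lemma hasSo_cons (p : List Char) (rest : List (List Char)) :
    HasSo (p :: rest) ↔ (p = ['s', 'o'] ∧ ∀ q ∈ rest, PySem.Chars.strIsdigit q) ∨ HasSo rest := by
  constructor
  · rintro ⟨pre, suf, heq, hdig⟩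
    cases pre with
    | nil => simp at heq; exact Or.inl ⟨heq.1, heq.2 ▸ hdig⟩
    | cons a pre' =>
      simp only [List.cons_append, List.cons.injEq] at heq
      exact Or.inr ⟨pre', suf, heq.2, hdig⟩
  · rintro (⟨h1, h2⟩ | ⟨pre, suf, heq, hdig⟩)
    · exact ⟨[], rest, by simp [h1], h2⟩
    · exact ⟨p :: pre, suf, by simp [heq], hdig⟩

lemma isSharedLoopA_iff (ps : List (List Char)) : isSharedLoopA ps = true ↔ HasSo ps := by
  induction ps with
  | nil =>
    simp only [isSharedLoopA, HasSo]
    constructor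
    · intro h; simp at h
    · rintro ⟨pre, suf, heq, -⟩
      exact absurd heq (by simp)
  | cons p rest ih =>
    rw [hasSo_cons]
    simp only [isSharedLoopA]
    by_cases hc : (p = ['s', 'o'] ∧ ∀ q ∈ rest, PySem.Chars.strIsdigit q)
    · rw [if_pos]
      · simp only [hc, true_iff]; exact Or.inl ⟨trivial, hc.2⟩
      · rcases hc with ⟨h1, h2⟩
        cases rest with
        | nil => simp [h1]
        | cons r rs =>
          simp only [h1, List.all_eq_true, List.isEmpty_cons, Bool.false_or, decide_true,
            Bool.true_and]
          exact fun x hx => h2 x hx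
    · rw [if_neg]
      · rw [ih]
        constructor
        · exact Or.inr
        · rintro (h | h)
          · exact absurd h hc
          · exact h
      · intro h
        simp only [Bool.and_eq_true, Bool.or_eq_true, decide_eq_true_eq, List.isEmpty_iff,
          List.all_eq_true] at h
        rcases h with ⟨h1, h2 | h2⟩
        · exact hc ⟨h1, by simp [h2]⟩
        · exact hc ⟨h1, h2⟩

lemma peelVersion_eq (ps : List (List Char)) :
    peelVersion ps = if 1 < ps.length ∧ PySem.Chars.strIsdigit (ps.getLastD []) then
      peelVersion ps.dropLast else ps := by
  rw [peelVersion]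

lemma peel_drop (ps : List (List Char)) :
    ∃ suf, ps = peelVersion ps ++ suf ∧ ∀ p ∈ suf, PySem.Chars.strIsdigit p := by
  induction hn : ps.length using Nat.strong_induction_on generalizing ps with
  | _ n ih =>
    rw [peelVersion_eq]
    by_cases h : 1 < ps.length ∧ PySem.Chars.strIsdigit (ps.getLastD [])
    · rw [if_pos h]
      have hnil : ps ≠ [] := by intro hnil; subst hnil; simp at h
      have hgd : ps.getLastD [] = ps.getLast hnil := by
        rw [List.getLastD_eq_getLast?, List.getLast?_eq_some_getLast hnil, Option.getD_some]
      obtain ⟨suf', h1, h2⟩ := ih (ps.dropLast.length) (by subst hn; simp; omega) ps.dropLast rfl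
      refine ⟨suf' ++ [ps.getLastD []], ?_, ?_⟩
      · rw [hgd, ← List.append_assoc, ← h1, List.dropLast_concat_getLast hnil]
      · intro p hp
        rcases List.mem_append.mp hp with hp | hp
        · exact h2 p hp
        · simp only [List.mem_singleton] at hp; subst hp; exact h.2
    · rw [if_neg h]; exact ⟨[], by simp, by simp⟩

lemma peel_append_digit (ps : List (List Char)) (d : List Char) (hne : ps ≠ [])
    (hd : PySem.Chars.strIsdigit d) : peelVersion (ps ++ [d]) = peelVersion ps := by
  rw [peelVersion_eq (ps ++ [d])]
  rw [if_pos]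
  · simp
  · constructor
    · simp; cases ps with | nil => exact absurd rfl hne | cons a l => simp
    · simpa using hd

lemma peel_fix (ps : List (List Char))
    (h : ¬ (1 < ps.length ∧ PySem.Chars.strIsdigit (ps.getLastD []))) : peelVersion ps = ps := by
  rw [peelVersion_eq, if_neg h]

lemma peel_concat_so (pre : List (List Char)) :
    peelVersion (pre ++ [['s', 'o']]) = pre ++ [['s', 'o']] := by
  refine peel_fix _ (fun hcond => ?_)
  have h2 := hcond.2
  rw [show (pre ++ [['s', 'o']]).getLastD [] = ['s', 'o'] from by
    simp] at h2
  exact absurd h2 (by decide)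

lemma peel_of_strict (ps : List (List Char)) (h : HasSoStrict ps) :
    ∃ pre, pre ≠ [] ∧ peelVersion ps = pre ++ [['s', 'o']] := by
  obtain ⟨pre, suf, heq, hpre, hdig⟩ := h
  subst heq
  refine ⟨pre, hpre, ?_⟩
  induction suf using List.reverseRecOn with
  | nil => exact peel_concat_so pre
  | append_singleton suf' d ihs =>
    have hsplit : pre ++ ['s', 'o'] :: (suf' ++ [d]) = (pre ++ ['s', 'o'] :: suf') ++ [d] := by
      simp
    rw [hsplit, peel_append_digit _ _ (by simp) (hdig d (by simp))]
    exact ihs (fun p hp => hdig p (by simp [List.mem_append] at hp ⊢; tauto))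

lemma alt_iff (ps : List (List Char)) :
    (decide (2 ≤ (peelVersion ps).length) && ((peelVersion ps).getLastD [] == ['s', 'o'])) = true
      ↔ HasSoStrict ps := by
  constructor
  · intro h
    simp only [Bool.and_eq_true, decide_eq_true_eq, beq_iff_eq] at h
    obtain ⟨h1, h2⟩ := h
    have hq : peelVersion ps ≠ [] := by intro hq; rw [hq] at h1; simp at h1
    have hsplit : peelVersion ps = (peelVersion ps).dropLast ++ [['s', 'o']] := by
      conv_lhs => rw [← List.dropLast_concat_getLast hq]
      rw [show (peelVersion ps).getLast hq = ['s', 'o'] from by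
        rw [← h2, List.getLastD_eq_getLast?, List.getLast?_eq_some_getLast hq, Option.getD_some]]
    obtain ⟨suf, hps, hdig⟩ := peel_drop ps
    refine ⟨(peelVersion ps).dropLast, suf, ?_, ?_, hdig⟩
    · conv_lhs => rw [hps]
      conv_lhs => rw [hsplit]
      simp
    · intro hnil
      have := congrArg List.length hnil
      simp at this
      omega
  · intro h
    obtain ⟨pre, hpre, hpeel⟩ := peel_of_strict ps h
    rw [hpeel]
    simp only [Bool.and_eq_true, decide_eq_true_eq, beq_iff_eq]
    constructor
    · cases pre with | nil => exact absurd rfl hpre | cons a l => simp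
    · simp

def dOk : List Char → Bool
  | [] => true
  | c :: rest =>
      (if c = '.' then
        match rest with
        | [] => false
        | d :: _ => PySem.Chars.isdigit d
      else true) && dOk rest

lemma dOk_no_infix (cs : List Char) (h : dOk cs = true) :
    ¬ (['.', 's', 'o'] <:+: cs) := by
  induction cs with
  | nil =>
    rintro ⟨s, t, hst⟩
    simp at hst
  | cons c rest ih =>
    intro hinf
    simp only [dOk, Bool.and_eq_true] at h
    rcases List.infix_cons_iff.mp hinf with hpre | hinf'
    · obtain ⟨t, ht⟩ := hpre
      simp only [List.cons_append, List.nil_append, List.cons.injEq] at ht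
      obtain ⟨hc, hrest⟩ := ht
      subst hc
      rw [if_pos rfl] at h
      rw [← hrest] at h
      simp only [] at h
      exact absurd h.1 (by decide)
    · exact ih h.2 hinf'

lemma dOk_append_digits (p x : List Char) (h : ∀ c ∈ p, PySem.Chars.isdigit c) :
    dOk (p ++ x) = dOk x := by
  induction p with
  | nil => rfl
  | cons c p' ih =>
    have hc : c ≠ '.' := by
      intro hc; subst hc
      have := h '.' (by simp)
      exact absurd this (by decide)
    simp only [List.cons_append, dOk, if_neg hc, Bool.true_and]
    exact ih (fun d hd => h d (by simp [hd]))

lemma dOk_joinDigits (suf : List (List Char)) (h : ∀ p ∈ suf, PySem.Chars.strIsdigit p)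
    (hne : suf ≠ []) :
    ∃ d t, joinDot suf = d :: t ∧ PySem.Chars.isdigit d ∧ dOk (d :: t) = true := by
  induction suf with
  | nil => exact absurd rfl hne
  | cons p rest ih =>
    have hp := h p (by simp)
    simp only [PySem.Chars.strIsdigit, Bool.and_eq_true, Bool.not_eq_true', List.isEmpty_eq_false_iff,
      List.all_eq_true] at hp
    obtain ⟨hpne, hpdig⟩ := hp
    obtain ⟨d, t, hpd⟩ : ∃ d t, p = d :: t := by
      cases p with | nil => exact absurd rfl hpne | cons d t => exact ⟨d, t, rfl⟩
    subst hpd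
    cases rest with
    | nil =>
      refine ⟨d, t, rfl, hpdig d (by simp), ?_⟩
      have := dOk_append_digits (d :: t) [] (by simpa using hpdig)
      simpa using this
    | cons q qs =>
      obtain ⟨d2, t2, hj2, hd2, hok2⟩ := ih (fun r hr => h r (by simp [hr])) (by simp)
      rw [joinDot_cons, hj2]
      refine ⟨d, t ++ '.' :: d2 :: t2, by simp, hpdig d (by simp), ?_⟩
      have : dOk ((d :: t) ++ ('.' :: d2 :: t2)) = dOk ('.' :: d2 :: t2) :=
        dOk_append_digits _ _ (by simpa using hpdig)
      simp only [List.cons_append] at this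
      rw [this]
      have hok2' := hok2
      simp only [dOk, Bool.and_eq_true] at hok2'
      simp only [dOk, Bool.and_eq_true]
      exact ⟨by simp [hd2], hok2'⟩

lemma joinDot_append_ne (pre : List (List Char)) (q : List Char) (ps : List (List Char))
    (h : pre ≠ []) :
    joinDot (pre ++ q :: ps) = joinDot pre ++ '.' :: joinDot (q :: ps) := by
  induction pre with
  | nil => exact absurd rfl h
  | cons a pre' ih =>
    cases pre' with
    | nil => simp [joinDot]
    | cons b pre'' =>
      have := ih (by simp)
      simp only [List.cons_append] at this ⊢
      rw [joinDot_cons, this, joinDot_cons]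
      simp

lemma joinDot_so_head (suf : List (List Char)) :
    ∃ t, joinDot (['s', 'o'] :: suf) = 's' :: 'o' :: t := by
  cases suf with
  | nil => exact ⟨[], rfl⟩
  | cons q qs => exact ⟨'.' :: joinDot (q :: qs), rfl⟩

lemma isIn_of_strict (cs : List Char) (h : HasSoStrict (spDot cs)) :
    PySem.Chars.isIn ['.', 's', 'o'] cs = true := by
  rw [PySem.Chars.isIn_iff_infix]
  obtain ⟨pre, suf, heq, hpre, -⟩ := h
  have hcs : cs = joinDot pre ++ '.' :: joinDot (['s', 'o'] :: suf) := by
    conv_lhs => rw [← joinDot_spDot cs, heq]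
    exact joinDot_append_ne pre _ suf hpre
  obtain ⟨t, hjt⟩ := joinDot_so_head suf
  refine ⟨joinDot pre, t, ?_⟩
  rw [hcs, hjt]
  simp

lemma not_isIn_of_head_so (cs : List Char) (suf : List (List Char))
    (hsp : spDot cs = ['s', 'o'] :: suf) (hd : ∀ p ∈ suf, PySem.Chars.strIsdigit p) :
    PySem.Chars.isIn ['.', 's', 'o'] cs = false := by
  rw [PySem.Chars.isIn_eq_false_iff]
  have hcs : cs = joinDot (['s', 'o'] :: suf) := by
    rw [← joinDot_spDot cs, hsp]
  cases suf with
  | nil =>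
    rw [hcs]
    rintro ⟨s, t, hst⟩
    have := congrArg List.length hst
    simp [joinDot] at this
    omega
  | cons q qs =>
    obtain ⟨d2, t2, hj2, hd2, hok2⟩ := dOk_joinDigits (q :: qs) hd (by simp)
    apply dOk_no_infix
    rw [hcs, joinDot_cons, hj2]
    have h1 : dOk ('.' :: d2 :: t2) = true := by
      have hok2' := hok2
      simp only [dOk, Bool.and_eq_true] at hok2' ⊢
      exact ⟨by simp [hd2], hok2'⟩
    simp only [List.cons_append, List.nil_append, dOk, Bool.and_eq_true] at h1 ⊢
    refine ⟨by simp, by simp, h1⟩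

theorem main_eq (name : String) : is_shared_object_py name = is_shared_object_py_alt name := by
  have hbr : PySem.Str.isIn ".so" name = PySem.Chars.isIn ['.', 's', 'o'] name.toList := by
    simp [PySem.Str.isIn_eq]
  have hAeq : is_shared_object_py name =
      (if !(PySem.Chars.isIn ['.', 's', 'o'] name.toList) then false
       else isSharedLoopA (spDot name.toList)) := by
    simp only [is_shared_object_py, splitOn_eq_spDot, hbr]
  have hBeq : is_shared_object_py_alt name =
      (decide (2 ≤ (peelVersion (spDot name.toList)).length) &&
        ((peelVersion (spDot name.toList)).getLastD [] == ['s', 'o'])) := by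
    simp only [is_shared_object_py_alt, splitOn_eq_spDot]
  rw [hAeq, hBeq]
  by_cases hstrict : HasSoStrict (spDot name.toList)
  · have hA : HasSo (spDot name.toList) := by
      obtain ⟨pre, suf, a, b, c⟩ := hstrict; exact ⟨pre, suf, a, c⟩
    rw [isIn_of_strict _ hstrict, (alt_iff _).mpr hstrict, (isSharedLoopA_iff _).mpr hA]
    simp
  · have halt : (decide (2 ≤ (peelVersion (spDot name.toList)).length) &&
        ((peelVersion (spDot name.toList)).getLastD [] == ['s', 'o'])) = false :=
      Bool.eq_false_iff.mpr (fun hx => hstrict ((alt_iff _).mp hx))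
    rw [halt]
    by_cases hA : HasSo (spDot name.toList)
    · obtain ⟨pre, suf, heq, hdig⟩ := hA
      have hpre : pre = [] := by
        by_contra hne; exact hstrict ⟨pre, suf, heq, hne, hdig⟩
      subst hpre
      rw [not_isIn_of_head_so _ suf (by simpa using heq) hdig]
      simp
    · have hloop : isSharedLoopA (spDot name.toList) = false :=
        Bool.eq_false_iff.mpr (fun hx => hA ((isSharedLoopA_iff _).mp hx))
      rw [hloop]
      cases PySem.Chars.isIn ['.', 's', 'o'] name.toList <;> simp

-- ===== VERDICT (by name: the statement is the Claim_ definition above) =====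
theorem is_shared_object_py_spec : Claim_equal_is_shared_object_py := by
  unfold Claim_equal_is_shared_object_py Spec_is_shared_object_py
  intro name _
  exact main_eq name
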